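-- pv_equiv track=rewrite | github.com/lucianoAvinas/201B_Project | extract_movie_info.py | rank_and_matching
-- ===== SOURCE A (Python) =====
-- def rank_and_matching(sub_list, full_list):
--     n1,n2 = len(sub_list), len(full_list)
--     if n2 == 0:
--         return [], [], False # no cast listed
--
--     matching = [0]*n1
--     rank = [0]*n1
--     sub_opts = list(range(n1))
--
--     # Check for main character
--     k = 1
--     for j in sub_opts:
--         x = sub_list[j]
--         if x == full_list[0] or x in full_list[0].split(' '):
--             matching[j] = 1
--             rank[j] = k
--
--             k += 1
--             sub_opts.remove(j)
--             break # partial matches can keep matching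
--
--     if len(sub_opts) == n1:
--         return [], [], False # negative result
--
--
--     # Continue gathering ranks
--     for i in range(1,n2):
--         y = full_list[i]
--         for j in sub_opts:
--             x = sub_list[j]
--             if x == y or x in y.split(' '):
--                 matching[j] = 1
--                 rank[j] = k
--
--                 k += 1
--                 sub_opts.remove(j)
--                 break # partial matches can keep matching
--
--     return rank, matching, True
-- ===== SOURCE B (Python) =====
-- def rank_and_matching(sub_list, full_list):
--     # Bucket index: each sub name maps to the queue of its (ascending) positions,
--     # so each full entry is matched by a min-over-bucket-heads lookup on its own
--     # tokens instead of a rescan of all remaining sub names.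
--     if not full_list:
--         return [], [], False  # no cast listed
--     n1 = len(sub_list)
--     buckets = {}
--     for j in range(n1):
--         buckets.setdefault(sub_list[j], []).append(j)
--
--     def take_best(y):
--         # smallest still-unmatched sub index whose name equals y or a token of y
--         best = None
--         for key in [y] + y.split(' '):
--             q = buckets.get(key)
--             if q and (best is None or q[0] < best):
--                 best = q[0]
--         if best is not None:
--             buckets[sub_list[best]].pop(0)
--         return best
--
--     rank = [0] * n1
--     matching = [0] * n1
--     first = take_best(full_list[0])
--     if first is None:
--         return [], [], False  # no main character match: negative result
--     rank[first] = 1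
--     matching[first] = 1
--     k = 2
--     for y in full_list[1:]:
--         j = take_best(y)
--         if j is not None:
--             rank[j] = k
--             matching[j] = 1
--             k += 1
--     return rank, matching, True
-- ===== Notes on version B (the rewrite author's own statement) =====
-- stated objective: faster
-- what changed: Replaces the per-entry rescan of all remaining sub names (testing each against the entry and its token list) by a precomputed bucket index from sub name to the queue of its positions, so each full entry does one min-over-heads lookup on its own tokens only.
import Mathlib
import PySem

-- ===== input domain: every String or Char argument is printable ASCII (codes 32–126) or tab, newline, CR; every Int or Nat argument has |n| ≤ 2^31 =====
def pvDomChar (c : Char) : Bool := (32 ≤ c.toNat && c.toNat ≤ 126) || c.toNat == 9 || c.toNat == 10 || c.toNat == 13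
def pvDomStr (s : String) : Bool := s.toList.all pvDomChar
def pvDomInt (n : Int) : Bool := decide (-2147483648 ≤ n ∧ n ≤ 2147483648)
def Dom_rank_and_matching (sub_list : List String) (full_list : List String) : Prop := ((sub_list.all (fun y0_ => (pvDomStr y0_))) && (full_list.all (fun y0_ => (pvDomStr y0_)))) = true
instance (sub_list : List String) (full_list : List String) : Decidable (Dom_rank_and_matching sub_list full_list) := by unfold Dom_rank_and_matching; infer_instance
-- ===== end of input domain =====

-- B replaces A's per-entry rescan of all remaining sub names by a bucket index
-- (sub name -> queue of its positions) queried only on each full entry's tokens (objective: faster).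

-- ===== PORT A =====

-- x == y or x in y.split(' ')
def pvMatchA (x y : String) : Bool := x == y || ((PySem.Str.split? y " ").getD []).contains x

-- 'for j in sub_opts: if match: ...; break' — first matching index (remove+break is immediate)
def pvFindA (sub : List String) (y : String) : List Int → Option Int
  | [] => none
  | j :: rest =>
    if pvMatchA (PySem.List.pyGetD sub j "") y then some j else pvFindA sub y rest

-- one full-list entry: state (matching, rank, k, sub_opts)
def pvStepA (sub : List String) (st : List Int × List Int × Int × List Int) (y : String) :
    List Int × List Int × Int × List Int :=
  match pvFindA sub y st.2.2.2 with
  | none => st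
  | some j => (st.1.set j.toNat 1, st.2.1.set j.toNat st.2.2.1, st.2.2.1 + 1, st.2.2.2.erase j)

def rank_and_matching (sub_list : List String) (full_list : List String) :
    List Int × List Int × Bool :=
  match full_list with
  | [] => ([], [], false)  -- no cast listed
  | y0 :: rest =>
    let n1 := sub_list.length
    let st0 : List Int × List Int × Int × List Int :=
      (List.replicate n1 0, List.replicate n1 0, 1, PySem.List.pyRange 0 n1 1)
    let st1 := pvStepA sub_list st0 y0
    if st1.2.2.2.length == n1 then ([], [], false)  -- negative result
    else
      let st2 := rest.foldl (pvStepA sub_list) st1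
      (st2.2.1, st2.1, true)

-- ===== PORT B =====

-- buckets: each sub name -> queue of its positions (setdefault(x, []).append(j))
def pvBuckets (sub : List String) : PySem.Dict String (List Int) :=
  (PySem.List.pyRange 0 sub.length 1).foldl
    (fun d j => d.modify (PySem.List.pyGetD sub j "") [] (fun l => l ++ [j]))
    PySem.Dict.empty

-- 'if q and (best is None or q[0] < best): best = q[0]'
def pvStepMin : Option Int → Int → Option Int
  | none, h => some h
  | some b, h => if h < b then some h else some b

def pvBestFold (bk : PySem.Dict String (List Int)) (keys : List String) : Option Int :=
  keys.foldl
    (fun best key =>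
      match bk.get? key with
      | some (h :: _) => pvStepMin best h
      | _ => best)
    none

-- take_best: smallest still-unmatched index matching y; pop it from its bucket
def pvTakeBest (sub : List String) (bk : PySem.Dict String (List Int)) (y : String) :
    Option Int × PySem.Dict String (List Int) :=
  match pvBestFold bk (y :: (PySem.Str.split? y " ").getD []) with
  | none => (none, bk)
  | some j => (some j, bk.modify (PySem.List.pyGetD sub j "") [] (fun l => l.drop 1))

-- one full-list entry: state (rank, matching, k, buckets)
def pvStepB (sub : List String) (st : List Int × List Int × Int × PySem.Dict String (List Int))
    (y : String) : List Int × List Int × Int × PySem.Dict String (List Int) :=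
  match pvTakeBest sub st.2.2.2 y with
  | (none, bk') => (st.1, st.2.1, st.2.2.1, bk')
  | (some j, bk') => (st.1.set j.toNat st.2.2.1, st.2.1.set j.toNat 1, st.2.2.1 + 1, bk')

def rank_and_matching_alt (sub_list : List String) (full_list : List String) :
    List Int × List Int × Bool :=
  match full_list with
  | [] => ([], [], false)  -- no cast listed
  | y0 :: rest =>
    let n1 := sub_list.length
    let bk0 := pvBuckets sub_list
    match pvTakeBest sub_list bk0 y0 with
    | (none, _) => ([], [], false)  -- negative result
    | (some j0, bk1) =>
      let st := rest.foldl (pvStepB sub_list)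
        (((List.replicate n1 0).set j0.toNat 1, (List.replicate n1 0).set j0.toNat 1, 2, bk1))
      (st.1, st.2.1, true)

-- ===== PRECONDITION & SPEC =====
def Spec_rank_and_matching (sub_list : List String) (full_list : List String) (out : List Int × List Int × Bool) : Prop := out = rank_and_matching_alt sub_list full_list
instance (sub_list : List String) (full_list : List String) (out : List Int × List Int × Bool) : Decidable (Spec_rank_and_matching sub_list full_list out) := by unfold Spec_rank_and_matching; infer_instance

-- ===== CLAIM (what is proved, stated in full; the proofs are below) =====
def Claim_equal_rank_and_matching : Prop := ∀ (sub_list : List String) (full_list : List String), Dom_rank_and_matching sub_list full_list → Spec_rank_and_matching sub_list full_list (rank_and_matching sub_list full_list)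


-- ===== LEMMAS AND PROOFS =====

-- value of sub_list at index j (abbreviation used only in the proofs)
def pvVal (sub : List String) (j : Int) : String := PySem.List.pyGetD sub j ""

-- invariant: buckets hold exactly the remaining indices, grouped by value, in order
def pvInv (sub : List String) (opts : List Int) (bk : PySem.Dict String (List Int)) : Prop :=
  List.Pairwise (· < ·) opts ∧
    ∀ v, bk.getD v [] = opts.filter (fun j => pvVal sub j == v)

-- the relation between A's and B's loop states
def pvRel (sub : List String) (stA : List Int × List Int × Int × List Int)
    (stB : List Int × List Int × Int × PySem.Dict String (List Int)) : Prop :=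
  stB.1 = stA.2.1 ∧ stB.2.1 = stA.1 ∧ stB.2.2.1 = stA.2.2.1 ∧ pvInv sub stA.2.2.2 stB.2.2.2

lemma pvFindA_eq_find? (sub : List String) (y : String) (opts : List Int) :
    pvFindA sub y opts = opts.find? (fun j => pvMatchA (PySem.List.pyGetD sub j "") y) := by
  induction opts with
  | nil => rfl
  | cons j rest ih => simp [pvFindA, List.find?, ih]; split <;> simp_all

lemma pvMatchA_eq_contains (x y : String) :
    pvMatchA x y = (y :: (PySem.Str.split? y " ").getD []).contains x := by
  simp only [pvMatchA, List.contains_cons]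

lemma pvBestFold_eq_minFold (bk : PySem.Dict String (List Int)) (keys : List String) :
    pvBestFold bk keys
      = (keys.filterMap (fun k => (bk.getD k []).head?)).foldl pvStepMin none := by
  unfold pvBestFold
  generalize none = acc
  induction keys generalizing acc with
  | nil => rfl
  | cons k ks ih =>
    simp only [List.foldl_cons, List.filterMap_cons, PySem.Dict.getD_eq_get?_getD]
    cases h : bk.get? k with
    | none => simpa using ih acc
    | some l =>
      cases l with
      | nil => simpa using ih acc
      | cons h0 t => simpa using ih (pvStepMin acc h0)

lemma pvStepMin_some (b h : Int) : pvStepMin (some b) h = some (min b h) := by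
  simp only [pvStepMin, Int.min_def]
  split_ifs <;> (first | rfl | omega)

lemma foldl_pvStepMin_some (as : List Int) (a : Int) :
    as.foldl pvStepMin (some a) = some (as.foldl min a) := by
  induction as generalizing a with
  | nil => rfl
  | cons h t ih => simp [pvStepMin_some, ih]

lemma foldl_pvStepMin_none (hs : List Int) : hs.foldl pvStepMin none = hs.min? := by
  cases hs with
  | nil => rfl
  | cons a as => simp [List.min?, pvStepMin, foldl_pvStepMin_some]

lemma min_heads_eq_find (sub : List String) (keys : List String) (opts : List Int)
    (hp : List.Pairwise (· < ·) opts) :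
    (keys.filterMap
        (fun k => (opts.filter (fun j => pvVal sub j == k)).head?)).min?
      = opts.find? (fun j => keys.contains (pvVal sub j)) := by
  induction opts with
  | nil => simp
  | cons j rest ih =>
    have hrest := (List.pairwise_cons.mp hp).2
    have hlt := (List.pairwise_cons.mp hp).1
    by_cases hc : pvVal sub j ∈ keys
    · -- j matches: it is the minimum of the bucket heads
      rw [List.find?_cons_of_pos (by simpa using hc)]
      apply List.min?_eq_some_iff.mpr
      constructor
      · refine List.mem_filterMap.mpr ⟨pvVal sub j, hc, ?_⟩
        simp
      · intro b hb
        rcases List.mem_filterMap.mp hb with ⟨k, _, hk⟩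
        have hbmem : b ∈ (j :: rest).filter (fun j' => pvVal sub j' == k) :=
          List.mem_of_mem_head? (by simp [hk])
        have : b ∈ j :: rest := List.mem_of_mem_filter hbmem
        rcases List.mem_cons.mp this with h | h
        · omega
        · exact le_of_lt (hlt b h)
    · -- j does not match: every bucket of keys ignores j
      rw [List.find?_cons_of_neg (by simpa using hc)]
      rw [← ih hrest]
      congr 1
      apply List.filterMap_congr
      intro k hk
      have : (pvVal sub j == k) = false := by
        cases hbe : pvVal sub j == k
        · rfl
        · exact absurd (eq_of_beq hbe ▸ hk) hc
      simp [this]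

lemma pvBestFold_eq_find (sub : List String) (opts : List Int)
    (bk : PySem.Dict String (List Int)) (hInv : pvInv sub opts bk) (keys : List String) :
    pvBestFold bk keys = opts.find? (fun j => keys.contains (pvVal sub j)) := by
  rw [pvBestFold_eq_minFold, foldl_pvStepMin_none, ← min_heads_eq_find sub keys opts hInv.1]
  congr 1
  apply List.filterMap_congr
  intro k _
  rw [hInv.2 k]

-- structure of the remaining list at a successful find
lemma pvFind_structure (sub : List String) (keys : List String) (opts : List Int) (j : Int)
    (hp : List.Pairwise (· < ·) opts)
    (hf : opts.find? (fun i => keys.contains (pvVal sub i)) = some j) :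
    ∀ v, (opts.erase j).filter (fun i => pvVal sub i == v)
        = if v = pvVal sub j then (opts.filter (fun i => pvVal sub i == v)).drop 1
          else opts.filter (fun i => pvVal sub i == v) := by
  rcases List.find?_eq_some_iff_append.mp hf with ⟨hpj, as, bs, heq, hnone⟩
  subst heq
  have hjnotas : j ∉ as := by
    intro hmem
    have := (List.pairwise_append.mp hp).2.2 j hmem j (by simp)
    omega
  have herase : (as ++ j :: bs).erase j = as ++ bs := by
    rw [List.erase_append_right _ hjnotas, List.erase_cons_head]
  intro v
  by_cases hv : v = pvVal sub j
  · subst hv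
    have hnomatch : ∀ a ∈ as, (pvVal sub a == pvVal sub j) = false := by
      intro a ha
      cases hbe : pvVal sub a == pvVal sub j
      · rfl
      · have : keys.contains (pvVal sub a) = true := by
          rw [eq_of_beq hbe]; simpa using hpj
        have := hnone a ha
        simp_all
    have hfilteras : as.filter (fun i => pvVal sub i == pvVal sub j) = [] :=
      List.filter_eq_nil_iff.mpr (by intro a ha; simp [hnomatch a ha])
    simp [herase, List.filter_append, hfilteras]
  · have hjv : (pvVal sub j == v) = false := by
      cases hbe : pvVal sub j == v
      · rfl
      · exact absurd (eq_of_beq hbe) (fun h => hv h.symm)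
    simp [herase, List.filter_append, hjv, hv]

lemma pvStep_rel (sub : List String) (y : String)
    (stA : List Int × List Int × Int × List Int)
    (stB : List Int × List Int × Int × PySem.Dict String (List Int))
    (h : pvRel sub stA stB) : pvRel sub (pvStepA sub stA y) (pvStepB sub stB y) := by
  obtain ⟨h1, h2, h3, hInv⟩ := h
  have hbf := pvBestFold_eq_find sub stA.2.2.2 stB.2.2.2 hInv
    (y :: (PySem.Str.split? y " ").getD [])
  have hfind : pvFindA sub y stA.2.2.2
      = stA.2.2.2.find? (fun j => (y :: (PySem.Str.split? y " ").getD []).contains (pvVal sub j)) := by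
    rw [pvFindA_eq_find?]
    simp only [pvMatchA_eq_contains, pvVal]
  unfold pvStepA pvStepB pvTakeBest
  rw [hbf, hfind]
  cases hf : stA.2.2.2.find? (fun j => (y :: (PySem.Str.split? y " ").getD []).contains (pvVal sub j)) with
  | none => exact ⟨h1, h2, h3, hInv⟩
  | some j =>
    dsimp only
    refine ⟨by simp [h1, h3], by simp [h2], by simp [h3], ?_, ?_⟩
    · exact List.Pairwise.sublist List.erase_sublist hInv.1
    · intro v
      dsimp only
      simp only [pvVal]
      have hI := hInv.2
      have hstruct := pvFind_structure sub _ stA.2.2.2 j hInv.1 hf v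
      simp only [pvVal] at hI hstruct
      rw [PySem.Dict.getD_modify, hI v, hstruct]
      by_cases hv : v = PySem.List.pyGetD sub j ""
      · subst hv
        rw [if_pos rfl, if_pos rfl, hI, List.drop_one]
      · rw [if_neg hv, if_neg hv]

lemma pvFold_rel (sub : List String) (ys : List String)
    (stA : List Int × List Int × Int × List Int)
    (stB : List Int × List Int × Int × PySem.Dict String (List Int))
    (h : pvRel sub stA stB) :
    pvRel sub (ys.foldl (pvStepA sub) stA) (ys.foldl (pvStepB sub) stB) := by
  induction ys generalizing stA stB with
  | nil => exact h
  | cons y ys ih => exact ih _ _ (pvStep_rel sub y stA stB h)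

lemma pvInv_init (sub : List String) :
    pvInv sub (PySem.List.pyRange 0 sub.length 1) (pvBuckets sub) := by
  refine ⟨PySem.List.pairwise_lt_pyRange_one 0 sub.length, ?_⟩
  intro v
  unfold pvBuckets
  have : (PySem.List.pyRange 0 sub.length 1).foldl
      (fun d j => d.modify (PySem.List.pyGetD sub j "") [] (fun l => l ++ [j]))
      PySem.Dict.empty
    = ((PySem.List.pyRange 0 sub.length 1).map
        (fun j => (PySem.List.pyGetD sub j "", j))).foldl
      (fun d p => d.modify p.1 [] (fun l => l ++ [p.2])) PySem.Dict.empty := by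
    rw [List.foldl_map]
  rw [this, PySem.Dict.getD_foldl_modify_append, List.filter_map]
  simp [List.map_map, Function.comp_def, pvVal]

theorem pv_main (sub_list full_list : List String) :
    rank_and_matching sub_list full_list = rank_and_matching_alt sub_list full_list := by
  unfold rank_and_matching rank_and_matching_alt
  cases full_list with
  | nil => rfl
  | cons y0 rest =>
    simp only []
    have hInv := pvInv_init sub_list
    have hRel0 : pvRel sub_list
        (List.replicate sub_list.length 0, List.replicate sub_list.length 0, 1,
          PySem.List.pyRange 0 sub_list.length 1)
        (List.replicate sub_list.length 0, List.replicate sub_list.length 0, 1,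
          pvBuckets sub_list) := ⟨rfl, rfl, rfl, hInv⟩
    have hRel1 := pvStep_rel sub_list y0 _ _ hRel0
    -- both sides take the same branch on the first entry
    have hbf := pvBestFold_eq_find sub_list _ _ hInv (y0 :: (PySem.Str.split? y0 " ").getD [])
    have hfind : pvFindA sub_list y0 (PySem.List.pyRange 0 sub_list.length 1)
        = (PySem.List.pyRange 0 sub_list.length 1).find?
            (fun j => (y0 :: (PySem.Str.split? y0 " ").getD []).contains (pvVal sub_list j)) := by
      rw [pvFindA_eq_find?]
      simp only [pvMatchA_eq_contains, pvVal]
    have hlen : (PySem.List.pyRange 0 (sub_list.length : Int) 1).length = sub_list.length := by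
      rw [PySem.List.length_pyRange_one]; omega
    cases hf : (PySem.List.pyRange 0 sub_list.length 1).find?
        (fun j => (y0 :: (PySem.Str.split? y0 " ").getD []).contains (pvVal sub_list j)) with
    | none =>
      -- no match: A keeps sub_opts full, B gets none — both negative
      have hA : pvStepA sub_list
          (List.replicate sub_list.length 0, List.replicate sub_list.length 0, 1,
            PySem.List.pyRange 0 sub_list.length 1) y0
          = (List.replicate sub_list.length 0, List.replicate sub_list.length 0, 1,
            PySem.List.pyRange 0 sub_list.length 1) := by
        unfold pvStepA
        rw [hfind, hf]
      have hB : pvTakeBest sub_list (pvBuckets sub_list) y0 = (none, pvBuckets sub_list) := by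
        unfold pvTakeBest
        rw [hbf, hf]
      rw [hA, hB]
      simp [hlen]
    | some j0 =>
      have hjmem : j0 ∈ PySem.List.pyRange 0 sub_list.length 1 := List.mem_of_find?_eq_some hf
      have hA : pvStepA sub_list
          (List.replicate sub_list.length 0, List.replicate sub_list.length 0, 1,
            PySem.List.pyRange 0 sub_list.length 1) y0
          = ((List.replicate sub_list.length 0).set j0.toNat 1,
             (List.replicate sub_list.length 0).set j0.toNat 1, 2,
             (PySem.List.pyRange 0 sub_list.length 1).erase j0) := by
        unfold pvStepA
        rw [hfind, hf]
        norm_num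
      have hB : pvTakeBest sub_list (pvBuckets sub_list) y0
          = (some j0, (pvBuckets sub_list).modify (PySem.List.pyGetD sub_list j0 "") []
              (fun l => l.drop 1)) := by
        unfold pvTakeBest
        rw [hbf, hf]
      have hB2 : pvStepB sub_list
          (List.replicate sub_list.length 0, List.replicate sub_list.length 0, 1,
            pvBuckets sub_list) y0
          = ((List.replicate sub_list.length 0).set j0.toNat 1,
             (List.replicate sub_list.length 0).set j0.toNat 1, 2,
             (pvBuckets sub_list).modify (PySem.List.pyGetD sub_list j0 "") []
              (fun l => l.drop 1)) := by
        unfold pvStepB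
        rw [hB]
        norm_num
      have hlen2 : ((PySem.List.pyRange 0 sub_list.length 1).erase j0).length
          = sub_list.length - 1 := by
        rw [List.length_erase_of_mem hjmem, hlen]
      have hne : 1 ≤ sub_list.length := by
        rcases Nat.eq_zero_or_pos sub_list.length with h0 | h
        · rw [h0] at hjmem
          rw [PySem.List.pyRange_one_eq_nil (by simp)] at hjmem
          simp at hjmem
        · exact h
      rw [hA, hB]
      have hbranch : (((PySem.List.pyRange 0 sub_list.length 1).erase j0).length
          == sub_list.length) = false := by
        rw [hlen2]
        simp
        omega
      simp only [hbranch, Bool.false_eq_true, if_false]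
      -- the fold states are related (hRel1 gives exactly this relation)
      rw [hA, hB2] at hRel1
      have hRel2 := pvFold_rel sub_list rest _ _ hRel1
      obtain ⟨g1, g2, _, _⟩ := hRel2
      rw [g1, g2]

-- ===== VERDICT (by name: the statement is the Claim_ definition above) =====
theorem rank_and_matching_spec : Claim_equal_rank_and_matching := by
  intro sub_list full_list _
  unfold Spec_rank_and_matching
  exact pv_main sub_list full_list
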